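-- pv_equiv track=rewrite | github.com/Premchand154/AI_Codbase_Intelligence_System | app/retriever.py | rerank_by_name
-- ===== SOURCE A (Python) =====
-- def rerank_by_name(query, retrieved):
--     query_lower = query.lower()
--     boosted = []
--
--     for chunk in retrieved:
--         score = 0
--
--         if chunk["name"].lower() in query_lower:
--             score += 5
--
--         for word in query_lower.split():
--             if word in chunk["content"].lower():
--                 score += 1
--
--         boosted.append((score, chunk))
--
--     boosted.sort(key=lambda x: x[0], reverse=True)
--     return [c for _, c in boosted]
-- ===== SOURCE B (Python) =====
-- def rerank_by_name(query, retrieved):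
--     ql = query.lower()
--     words = ql.split()
--
--     scored = []
--     top = 0
--     for chunk in retrieved:
--         s = 5 if chunk["name"].lower() in ql else 0
--         cl = chunk["content"].lower()
--         for w in words:
--             if w in cl:
--                 s += 1
--         scored.append((s, chunk))
--         if s > top:
--             top = s
--
--     out = []
--     for s in range(top, -1, -1):
--         out.extend(c for sc, c in scored if sc == s)
--     return out
-- ===== Notes on version B (the rewrite author's own statement) =====
-- stated objective: alternative
-- what changed: Replaces the comparison sort of (score, chunk) tuples by a counting/bucket emission: the maximum score is tracked while scoring, and the result is materialized by sweeping scores from the maximum down to 0 and emitting each score's chunks in encounter order, which reproduces the stable descending sort without sorting.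
import Mathlib
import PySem

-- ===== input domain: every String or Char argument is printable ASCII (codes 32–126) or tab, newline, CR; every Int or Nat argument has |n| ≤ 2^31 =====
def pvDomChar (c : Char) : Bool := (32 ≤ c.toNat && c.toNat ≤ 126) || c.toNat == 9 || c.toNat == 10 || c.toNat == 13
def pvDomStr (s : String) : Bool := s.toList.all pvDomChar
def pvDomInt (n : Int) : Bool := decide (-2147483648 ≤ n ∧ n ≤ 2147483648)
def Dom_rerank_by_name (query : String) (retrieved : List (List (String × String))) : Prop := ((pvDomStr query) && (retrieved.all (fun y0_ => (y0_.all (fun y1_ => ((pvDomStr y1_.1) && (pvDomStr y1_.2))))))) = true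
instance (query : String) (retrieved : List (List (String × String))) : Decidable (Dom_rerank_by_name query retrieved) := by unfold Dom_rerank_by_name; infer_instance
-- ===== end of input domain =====

-- B replaces A's comparison sort of (score, chunk) tuples by a max-tracking counting sweep
-- (emit buckets from the maximum score down to 0, in encounter order); same return value.

-- ===== PORT A =====
-- chunk[k] for the dict 'chunk' (first match); total via getD "", used only under Pre_ (key present)
def pvKey (chunk : List (String × String)) (k : String) : String :=
  (List.lookup k chunk).getD ""

-- the body of A's per-chunk loop: score = 0; +5 on name match; +1 per query word in content
def pvScoreA (ql : String) (chunk : List (String × String)) : Int :=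
  let s0 : Int := if PySem.Str.isIn (PySem.Str.lower (pvKey chunk "name")) ql then 5 else 0
  (PySem.Str.split₀ ql).foldl
    (fun acc w => if PySem.Str.isIn w (PySem.Str.lower (pvKey chunk "content")) then acc + 1 else acc) s0

def rerank_by_name (query : String) (retrieved : List (List (String × String))) : List (List (String × String)) :=
  let ql := PySem.Str.lower query
  let boosted := retrieved.foldl (fun acc chunk => acc ++ [(pvScoreA ql chunk, chunk)]) []
  (PySem.List.sorted boosted (fun x => x.1) true).map (fun x => x.2)

-- ===== PORT B =====
-- B's scorer: words and content.lower() hoisted, same additions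
def pvScoreB (ql : String) (words : List String) (chunk : List (String × String)) : Int :=
  let s0 : Int := if PySem.Str.isIn (PySem.Str.lower (pvKey chunk "name")) ql then 5 else 0
  let cl := PySem.Str.lower (pvKey chunk "content")
  words.foldl (fun acc w => if PySem.Str.isIn w cl then acc + 1 else acc) s0

def rerank_by_name_alt (query : String) (retrieved : List (List (String × String))) : List (List (String × String)) :=
  let ql := PySem.Str.lower query
  let words := PySem.Str.split₀ ql
  let scored := retrieved.map (fun c => (pvScoreB ql words c, c))
  let top := scored.foldl (fun m p => if p.1 > m then p.1 else m) 0
  (PySem.List.pyRange top (-1) (-1)).foldl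
    (fun out s => out ++ (scored.filter (fun p => p.1 == s)).map (fun p => p.2)) []

-- ===== PRECONDITION & SPEC =====
-- Pre_ excludes exactly the inputs where A raises KeyError: a chunk without a "name" or "content" key.
def Pre_rerank_by_name (query : String) (retrieved : List (List (String × String))) : Prop :=
  ∀ chunk ∈ retrieved, (List.lookup "name" chunk).isSome ∧ (List.lookup "content" chunk).isSome

instance (query : String) (retrieved : List (List (String × String))) : Decidable (Pre_rerank_by_name query retrieved) := by
  unfold Pre_rerank_by_name; infer_instance

def pvWitness_rerank_by_name : String × (List (List (String × String))) :=
  ("find the parser", [[("name", "parser"), ("content", "def parse(x): return x")],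
                       [("name", "lexer"), ("content", "the parser helper")]])

def Spec_rerank_by_name (query : String) (retrieved : List (List (String × String))) (out : List (List (String × String))) : Prop := out = rerank_by_name_alt query retrieved
instance (query : String) (retrieved : List (List (String × String))) (out : List (List (String × String))) : Decidable (Spec_rerank_by_name query retrieved out) := by unfold Spec_rerank_by_name; infer_instance

-- ===== CLAIM (what is proved, stated in full; the proofs are below) =====
def Claim_equal_rerank_by_name : Prop := ∀ (query : String) (retrieved : List (List (String × String))), Dom_rerank_by_name query retrieved → Pre_rerank_by_name query retrieved → Spec_rerank_by_name query retrieved (rerank_by_name query retrieved)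

-- ===== LEMMAS AND PROOFS =====

-- scores are nonnegative
theorem pvScore_nonneg (ql : String) (chunk : List (String × String)) :
    0 ≤ pvScoreA ql chunk := by
  unfold pvScoreA
  have h : ∀ (ws : List String) (acc : Int), 0 ≤ acc →
      0 ≤ ws.foldl (fun acc w => if PySem.Str.isIn w (PySem.Str.lower (pvKey chunk "content")) then acc + 1 else acc) acc := by
    intro ws
    induction ws with
    | nil => intro acc h; simpa using h
    | cons w ws ih => intro acc h; simp only [List.foldl_cons]; split <;> [exact ih _ (by omega); exact ih _ h]
  exact h _ _ (by split <;> norm_num)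

-- the running-max loop bounds every element and its init
theorem pvFoldlMax (l : List Int) (init : Int) :
    init ≤ l.foldl (fun m x => if x > m then x else m) init ∧
    ∀ x ∈ l, x ≤ l.foldl (fun m x => if x > m then x else m) init := by
  induction l generalizing init with
  | nil => simp
  | cons y l ih =>
    simp only [List.foldl_cons, List.mem_cons]
    have hstep : init ≤ (if y > init then y else init) ∧ y ≤ (if y > init then y else init) := by
      split <;> omega
    refine ⟨le_trans hstep.1 (ih _).1, ?_⟩
    rintro x (rfl | hx)
    · exact le_trans hstep.2 (ih _).1
    · exact (ih _).2 x hx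

-- inserting when every element compares 'before' : goes to the front
theorem pvInsertBy_front {α : Type} (bf : α → α → Bool) (x : α) (l : List α)
    (h : ∀ y ∈ l, bf x y = true) : PySem.List.insertBy bf x l = x :: l := by
  cases l with
  | nil => rfl
  | cons y l => simp [PySem.List.insertBy, h y (by simp)]

-- insertBy passes over a prefix on which 'before' fails
theorem pvInsertBy_append {α : Type} (bf : α → α → Bool) (x : α) (A B : List α)
    (h : ∀ y ∈ A, bf x y = false) :
    PySem.List.insertBy bf x (A ++ B) = A ++ PySem.List.insertBy bf x B := by
  induction A with
  | nil => rfl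
  | cons a A ih =>
    simp only [List.cons_append, PySem.List.insertBy, h a (by simp)]
    simp only [Bool.false_eq_true, if_false, List.cons.injEq, true_and]
    exact ih (fun y hy => h y (by simp [hy]))

-- inserting one element into a strictly-descending bucket concatenation lands in its bucket, at the end
theorem pvBucketInsert {α : Type} (key : α → Int) (p : α) (pairs : List α) (ss : List Int)
    (hss : ss.Pairwise (· > ·)) (hv : key p ∈ ss) :
    PySem.List.insertBy (fun a b => decide (key b < key a)) p
        (List.flatten (ss.map (fun s => pairs.filter (fun q => key q == s))))
      = List.flatten (ss.map (fun s => (pairs ++ [p]).filter (fun q => key q == s))) := by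
  induction ss with
  | nil => simp at hv
  | cons s ss ih =>
    have hgt : ∀ t ∈ ss, s > t := fun t ht => (List.pairwise_cons.mp hss).1 t ht
    have hss' := (List.pairwise_cons.mp hss).2
    simp only [List.map_cons, List.flatten_cons]
    by_cases hps : key p = s
    · -- p's bucket is the first: pass over it, then go before everything that remains
      rw [pvInsertBy_append _ _ _ _ (by
        intro y hy
        have := (List.mem_filter.mp hy).2
        simp only [beq_iff_eq] at this
        simp [this, hps])]
      rw [pvInsertBy_front _ _ _ (by
        intro y hy
        obtain ⟨l, hl, hyl⟩ := List.mem_flatten.mp hy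
        obtain ⟨t, ht, rfl⟩ := List.mem_map.mp hl
        have := (List.mem_filter.mp hyl).2
        simp only [beq_iff_eq] at this
        simp only [decide_eq_true_eq, this, hps]
        exact hgt t ht)]
      have hrest : ∀ t ∈ ss, (pairs ++ [p]).filter (fun q => key q == t) = pairs.filter (fun q => key q == t) := by
        intro t ht
        rw [List.filter_append]
        have hne : (s == t) = false := by
          have := hgt t ht; simp; omega
        simp [List.filter, hps, hne]
      rw [List.filter_append]
      simp only [List.filter, hps, beq_self_eq_true]
      have : (List.map (fun t => List.filter (fun q => key q == t) (pairs ++ [p])) ss) =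
             (List.map (fun t => List.filter (fun q => key q == t) pairs) ss) :=
        List.map_congr_left (fun t ht => hrest t ht)
      rw [this]
      simp
    · -- p belongs to a later bucket: pass over bucket s
      have hv' : key p ∈ ss := by
        rcases List.mem_cons.mp hv with h | h
        · exact absurd h hps
        · exact h
      have hlt : key p < s := hgt _ hv'
      rw [pvInsertBy_append _ _ _ _ (by
        intro y hy
        have := (List.mem_filter.mp hy).2
        simp only [beq_iff_eq] at this
        simp only [decide_eq_false_iff_not, not_lt, this]
        omega)]
      rw [ih hss' hv']
      have : (pairs ++ [p]).filter (fun q => key q == s) = pairs.filter (fun q => key q == s) := by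
        have hne : (key p == s) = false := by simpa using hps
        rw [List.filter_append]; simp [List.filter, hne]
      rw [this]

-- stable descending sort = concatenation of the score buckets in strictly-descending score order
theorem pvBucketSorted {α : Type} (key : α → Int) (pairs : List α) (ss : List Int)
    (hss : ss.Pairwise (· > ·)) (hall : ∀ p ∈ pairs, key p ∈ ss) :
    PySem.List.sorted pairs key true
      = List.flatten (ss.map (fun s => pairs.filter (fun q => key q == s))) := by
  induction pairs using List.reverseRecOn with
  | nil => simp [PySem.List.sorted]
  | append_singleton pairs p ih =>
    rw [PySem.List.sorted_rev_eq_foldl_insertBy, List.foldl_append]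
    simp only [List.foldl_cons, List.foldl_nil]
    rw [← PySem.List.sorted_rev_eq_foldl_insertBy]
    rw [ih (fun q hq => hall q (by simp [hq]))]
    exact pvBucketInsert key p pairs ss hss (hall p (by simp))

-- ===== VERDICT (by name: the statement is the Claim_ definition above) =====
theorem rerank_by_name_spec : Claim_equal_rerank_by_name := by
  intro query retrieved _ _
  show rerank_by_name query retrieved = rerank_by_name_alt query retrieved
  unfold rerank_by_name rerank_by_name_alt
  dsimp only
  rw [PySem.List.foldl_append_singleton_eq_map, List.nil_append,
      PySem.List.foldl_append_eq_flatMap, List.nil_append]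
  have hkey : (fun (c : List (String × String)) => (pvScoreA (PySem.Str.lower query) c, c))
      = (fun c => (pvScoreB (PySem.Str.lower query) (PySem.Str.split₀ (PySem.Str.lower query)) c, c)) := rfl
  rw [hkey]
  set ql := PySem.Str.lower query with hql
  set scored := retrieved.map (fun c => (pvScoreB ql (PySem.Str.split₀ ql) c, c)) with hscored
  set top := scored.foldl (fun m p => if p.1 > m then p.1 else m) 0 with htopdef
  have hss : (PySem.List.pyRange top (-1) (-1)).Pairwise (· > ·) := by
    rw [PySem.List.pyRange_neg_one_eq_reverse]
    exact List.pairwise_reverse.mpr (PySem.List.pairwise_lt_pyRange_one 0 (top + 1))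
  have hall : ∀ p ∈ scored, p.1 ∈ PySem.List.pyRange top (-1) (-1) := by
    intro p hp
    have hle : p.1 ≤ top := by
      have h := (pvFoldlMax (scored.map (fun p => p.1)) 0).2 p.1 (List.mem_map.mpr ⟨p, hp, rfl⟩)
      rwa [List.foldl_map] at h
    have hnn : 0 ≤ p.1 := by
      obtain ⟨c, _, rfl⟩ := List.mem_map.mp hp
      exact pvScore_nonneg ql c
    exact PySem.List.mem_pyRange_neg_one.mpr ⟨by omega, hle⟩
  rw [pvBucketSorted (fun p => p.1) scored _ hss hall]
  simp [List.flatMap_def, List.map_flatten, List.map_map, Function.comp_def]
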